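-- pv_equiv track=rewrite | github.com/hx676/vcptoolbox-openclaw | Plugin/XiaohongshuFetch/XiaohongshuFetch.py | select_profile_note_group
-- ===== SOURCE A (Python) =====
-- def select_profile_note_group(notes_groups, active_tab):
--     if not isinstance(notes_groups, list):
--         return []
--
--     candidate_indices = []
--     if isinstance(active_tab, dict):
--         for key in ("index", "key"):
--             value = active_tab.get(key)
--             if isinstance(value, int) and 0 <= value < len(notes_groups):
--                 candidate_indices.append(value)
--
--     for index in range(len(notes_groups)):
--         if index not in candidate_indices:
--             candidate_indices.append(index)
--
--     for index in candidate_indices: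
--         group = notes_groups[index]
--         if isinstance(group, list) and group:
--             return group
--     return []
-- ===== SOURCE B (Python) =====
-- def select_profile_note_group(notes_groups, active_tab):
--     if not isinstance(notes_groups, list):
--         return []
--
--     # Phase 1: preferred index from the active tab, returned immediately if usable.
--     if isinstance(active_tab, dict):
--         for key in ("index", "key"):
--             value = active_tab.get(key)
--             if isinstance(value, int) and 0 <= value < len(notes_groups):
--                 group = notes_groups[value]
--                 if isinstance(group, list) and group:
--                     return group
--
--     # Phase 2: first non-empty list group in order.
--     for group in notes_groups:
--         if isinstance(group, list) and group:
--             return group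
--     return []
-- ===== Notes on version B (the rewrite author's own statement) =====
-- stated objective: simpler
-- what changed: Drops the intermediate candidate_indices list with its per-index membership scans; B is two early-return passes: try the active tab's 'index'/'key' directly, then scan notes_groups itself for the first non-empty group.
import Mathlib
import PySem

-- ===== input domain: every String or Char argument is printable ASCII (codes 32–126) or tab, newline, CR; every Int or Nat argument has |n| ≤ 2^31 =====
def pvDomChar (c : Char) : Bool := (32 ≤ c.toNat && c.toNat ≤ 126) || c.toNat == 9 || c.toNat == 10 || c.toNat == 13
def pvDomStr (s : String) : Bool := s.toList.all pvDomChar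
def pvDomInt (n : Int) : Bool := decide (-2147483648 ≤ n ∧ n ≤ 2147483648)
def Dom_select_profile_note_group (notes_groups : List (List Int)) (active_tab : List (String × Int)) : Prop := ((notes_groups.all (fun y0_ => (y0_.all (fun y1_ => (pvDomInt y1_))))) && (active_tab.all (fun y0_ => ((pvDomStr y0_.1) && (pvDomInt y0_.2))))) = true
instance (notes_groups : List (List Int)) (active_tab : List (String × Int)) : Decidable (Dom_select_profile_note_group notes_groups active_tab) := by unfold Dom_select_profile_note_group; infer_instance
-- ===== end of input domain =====

-- B drops A's intermediate candidate_indices list (with its per-index membership scans)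
-- in favour of two early-return passes: try the active tab's 'index'/'key' directly, then
-- scan notes_groups itself for the first non-empty group.


-- ===== PORT A =====
-- A's final loop: 'for index in candidate_indices: group = notes_groups[index]; if … group: return group' / 'return []'.
-- (pyGet? = none would be Python's IndexError; every candidate index is in range, so that branch is unreachable.)
def pvScanA (notes_groups : List (List Int)) : List Int → List Int
  | [] => []
  | i :: rest =>
    match PySem.List.pyGet? notes_groups i with
    | some g => if g ≠ [] then g else pvScanA notes_groups rest
    | none => pvScanA notes_groups rest

def select_profile_note_group (notes_groups : List (List Int)) (active_tab : List (String × Int)) : List Int :=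
  -- candidate_indices from the two preferred keys
  let c0 : List Int := ["index", "key"].foldl (fun c k =>
    match PySem.Dict.get? (PySem.Dict.mk active_tab) k with
    | some v => if 0 ≤ v ∧ v < (notes_groups.length : Int) then c ++ [v] else c
    | none => c) []
  -- for index in range(len(notes_groups)): if index not in candidate_indices: append
  let c := (PySem.List.pyRange 0 (notes_groups.length : Int) 1).foldl
    (fun c i => if i ∈ c then c else c ++ [i]) c0
  pvScanA notes_groups c

-- ===== PORT B =====
-- B phase 1: loop over the preferred keys, returning the group immediately when usable.
def pvTryKeys (notes_groups : List (List Int)) (active_tab : List (String × Int)) : List String → Option (List Int)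
  | [] => none
  | k :: ks =>
    match PySem.Dict.get? (PySem.Dict.mk active_tab) k with
    | some v =>
      if 0 ≤ v ∧ v < (notes_groups.length : Int) then
        match PySem.List.pyGet? notes_groups v with
        | some g => if g ≠ [] then some g else pvTryKeys notes_groups active_tab ks
        | none => pvTryKeys notes_groups active_tab ks
      else pvTryKeys notes_groups active_tab ks
    | none => pvTryKeys notes_groups active_tab ks

-- B phase 2: first non-empty group of notes_groups itself.
def pvFirstNonEmpty : List (List Int) → List Int
  | [] => []
  | g :: gs => if g ≠ [] then g else pvFirstNonEmpty gs

def select_profile_note_group_alt (notes_groups : List (List Int)) (active_tab : List (String × Int)) : List Int :=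
  match pvTryKeys notes_groups active_tab ["index", "key"] with
  | some g => g
  | none => pvFirstNonEmpty notes_groups

-- ===== PRECONDITION & SPEC =====
def Spec_select_profile_note_group (notes_groups : List (List Int)) (active_tab : List (String × Int)) (out : List Int) : Prop := out = select_profile_note_group_alt notes_groups active_tab
instance (notes_groups : List (List Int)) (active_tab : List (String × Int)) (out : List Int) : Decidable (Spec_select_profile_note_group notes_groups active_tab out) := by unfold Spec_select_profile_note_group; infer_instance

-- ===== CLAIM (what is proved, stated in full; the proofs are below) =====
def Claim_equal_select_profile_note_group : Prop := ∀ (notes_groups : List (List Int)) (active_tab : List (String × Int)), Dom_select_profile_note_group notes_groups active_tab → Spec_select_profile_note_group notes_groups active_tab (select_profile_note_group notes_groups active_tab)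

-- ===== LEMMAS AND PROOFS =====

-- Option-valued version of A's final scan, for composing over list append.
def pvScanA? (notes_groups : List (List Int)) : List Int → Option (List Int)
  | [] => none
  | i :: rest =>
    match PySem.List.pyGet? notes_groups i with
    | some g => if g ≠ [] then some g else pvScanA? notes_groups rest
    | none => pvScanA? notes_groups rest

theorem pvScanA_eq_getD (ng : List (List Int)) (l : List Int) :
    pvScanA ng l = (pvScanA? ng l).getD [] := by
  induction l with
  | nil => rfl
  | cons i rest ih =>
    simp only [pvScanA, pvScanA?]
    cases h : PySem.List.pyGet? ng i with
    | none => exact ih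
    | some g => by_cases hg : g = [] <;> simp [hg, ih]

theorem pvScanA?_append (ng : List (List Int)) (xs ys : List Int) :
    pvScanA? ng (xs ++ ys) =
      (match pvScanA? ng xs with | some g => some g | none => pvScanA? ng ys) := by
  induction xs with
  | nil => rfl
  | cons i rest ih =>
    simp only [List.cons_append, pvScanA?]
    cases h : PySem.List.pyGet? ng i with
    | none => exact ih
    | some g => by_cases hg : g = [] <;> simp [hg, ih]

-- A's dedup-append loop over a Nodup list just appends the elements not already present.
theorem pvFoldlDedup (l : List Int) (hl : l.Nodup) (c0 : List Int) :
    l.foldl (fun c i => if i ∈ c then c else c ++ [i]) c0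
      = c0 ++ l.filter (fun i => i ∉ c0) := by
  induction l generalizing c0 with
  | nil => simp
  | cons a rest ih =>
    rcases List.nodup_cons.mp hl with ⟨ha, hrest⟩
    simp only [List.foldl_cons]
    by_cases hac : a ∈ c0
    · simp [hac, ih hrest c0]
    · rw [if_neg hac, ih hrest (c0 ++ [a])]
      simp only [List.filter_cons, hac, List.append_assoc, List.singleton_append,
        not_false_eq_true, decide_true, if_pos]
      refine congrArg _ (congrArg _ ?_)
      apply List.filter_congr
      intro x hx
      have hxa : x ≠ a := fun h => ha (h ▸ hx)
      simp [hxa]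

-- If A's scan of the preferred candidates found nothing, each preferred index points at an empty group.
theorem pvScanA?_none_skip (ng : List (List Int)) (l : List Int) (h : pvScanA? ng l = none) :
    ∀ i ∈ l, PySem.List.pyGet? ng i = none ∨ PySem.List.pyGet? ng i = some [] := by
  induction l with
  | nil => simp
  | cons j rest ih =>
    intro i hi
    simp only [pvScanA?] at h
    rcases List.mem_cons.mp hi with hi | hi
    · cases hg : PySem.List.pyGet? ng j with
      | none => subst hi; exact Or.inl hg
      | some g =>
        subst hi
        rw [hg] at h
        by_cases hge : g = []
        · exact Or.inr (hge ▸ hg)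
        · simp [hge] at h
    · apply ih _ i hi
      cases hg : PySem.List.pyGet? ng j with
      | none => rw [hg] at h; exact h
      | some g =>
        rw [hg] at h
        by_cases hge : g = []
        · simpa [hge] using h
        · simp [hge] at h

-- Filtering out skippable indices does not change the scan result.
theorem pvScanA?_filter (ng : List (List Int)) (l : List Int) (p : Int → Bool)
    (h : ∀ i ∈ l, p i = false → PySem.List.pyGet? ng i = none ∨ PySem.List.pyGet? ng i = some []) :
    pvScanA? ng (l.filter p) = pvScanA? ng l := by
  induction l with
  | nil => rfl
  | cons j rest ih =>
    have hrest : ∀ i ∈ rest, p i = false → PySem.List.pyGet? ng i = none ∨ PySem.List.pyGet? ng i = some [] :=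
      fun i hi => h i (List.mem_cons_of_mem _ hi)
    simp only [List.filter_cons]
    by_cases hp : p j = true
    · simp only [hp, if_pos, pvScanA?]
      cases hg : PySem.List.pyGet? ng j with
      | none => exact ih hrest
      | some g => by_cases hge : g = [] <;> simp [hge, ih hrest]
    · have hpf : p j = false := by simpa using hp
      rcases h j List.mem_cons_self hpf with hg | hg <;>
        simp [hp, pvScanA?, hg, ih hrest]

-- A's scan over range(len) is B's direct scan of notes_groups (generalised over a drop).
theorem pvScanA?_range_drop (ng : List (List Int)) (k : Nat) :
    pvScanA? ng (PySem.List.pyRange (k : Int) (ng.length : Int) 1)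
      = (match pvFirstNonEmpty (ng.drop k) with | [] => none | g => some g) := by
  by_cases hk : k < ng.length
  · rw [PySem.List.pyRange_one_cons (by exact_mod_cast hk)]
    have hdrop : ng.drop k = ng[k] :: ng.drop (k + 1) :=
      List.drop_eq_getElem_cons hk
    have hget : PySem.List.pyGet? ng (k : Int) = some ng[k] := by
      simp [PySem.List.pyGet?_natCast, List.getElem?_eq_getElem hk]
    have hrec := pvScanA?_range_drop ng (k + 1)
    simp only [pvScanA?, hget, hdrop, pvFirstNonEmpty]
    by_cases hg : ng[k] = []
    · simp only [hg, ite_not]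
      simpa using hrec
    · simp [hg]
  · have h1 : PySem.List.pyRange (k : Int) (ng.length : Int) 1 = [] :=
      PySem.List.pyRange_one_eq_nil (by exact_mod_cast Nat.le_of_not_lt hk)
    have h2 : ng.drop k = [] := List.drop_eq_nil_of_le (Nat.le_of_not_lt hk)
    simp [h1, h2, pvScanA?, pvFirstNonEmpty]
  termination_by ng.length - k

-- The foldl building c0 only appends, so the accumulator factors out.
theorem pvBuildC_acc (ng : List (List Int)) (at_ : List (String × Int)) (ks : List String) (c : List Int) :
    ks.foldl (fun c k =>
      match PySem.Dict.get? (PySem.Dict.mk at_) k with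
      | some v => if 0 ≤ v ∧ v < (ng.length : Int) then c ++ [v] else c
      | none => c) c
    = c ++ ks.foldl (fun c k =>
      match PySem.Dict.get? (PySem.Dict.mk at_) k with
      | some v => if 0 ≤ v ∧ v < (ng.length : Int) then c ++ [v] else c
      | none => c) [] := by
  induction ks generalizing c with
  | nil => simp
  | cons k rest ih =>
    simp only [List.foldl_cons]
    cases h : PySem.Dict.get? (PySem.Dict.mk at_) k with
    | none => exact ih c
    | some v =>
      by_cases hv : 0 ≤ v ∧ v < (ng.length : Int)
      · simp only [if_pos hv, List.nil_append]
        rw [ih (c ++ [v]), ih [v]]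
        simp
      · simp only [if_neg hv]
        exact ih c

-- A's scan of the key-built candidates is exactly B's phase-1 key loop.
theorem pvScanA?_buildC (ng : List (List Int)) (at_ : List (String × Int)) (ks : List String) :
    pvScanA? ng (ks.foldl (fun c k =>
      match PySem.Dict.get? (PySem.Dict.mk at_) k with
      | some v => if 0 ≤ v ∧ v < (ng.length : Int) then c ++ [v] else c
      | none => c) [])
    = pvTryKeys ng at_ ks := by
  induction ks with
  | nil => rfl
  | cons k rest ih =>
    simp only [List.foldl_cons, pvTryKeys]
    cases h : PySem.Dict.get? (PySem.Dict.mk at_) k with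
    | none => simpa using ih
    | some v =>
      by_cases hv : 0 ≤ v ∧ v < (ng.length : Int)
      · simp only [if_pos hv]
        rw [pvBuildC_acc, pvScanA?_append]
        cases hget : PySem.List.pyGet? ng v with
        | none =>
          rw [PySem.List.pyGet?_eq_none_iff] at hget
          exact absurd (by unfold PySem.Raise.InRange; omega) hget
        | some g =>
          have h1 : pvScanA? ng [v] = if g ≠ [] then some g else none := by
            simp [pvScanA?, hget]
          by_cases hg : g = [] <;> simp [h1, hg, ih]
      · simp only [if_neg hv]
        exact ih

-- ===== VERDICT (by name: the statement is the Claim_ definition above) =====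
theorem select_profile_note_group_spec : Claim_equal_select_profile_note_group := by
  intro ng at_ _
  unfold Spec_select_profile_note_group select_profile_note_group select_profile_note_group_alt
  simp only []
  rw [pvFoldlDedup _ (PySem.List.nodup_pyRange_one 0 (ng.length : Int)) _,
      pvScanA_eq_getD, pvScanA?_append, pvScanA?_buildC]
  cases htry : pvTryKeys ng at_ ["index", "key"] with
  | some g => rfl
  | none =>
    have hskip := pvScanA?_none_skip ng _ ((pvScanA?_buildC ng at_ ["index", "key"]).trans htry)
    rw [pvScanA?_filter ng _ _ (by
      intro i hi hp
      have hic : i ∈ ["index", "key"].foldl (fun c k =>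
          match PySem.Dict.get? (PySem.Dict.mk at_) k with
          | some v => if 0 ≤ v ∧ v < (ng.length : Int) then c ++ [v] else c
          | none => c) [] := by simpa using hp
      exact hskip i hic)]
    have := pvScanA?_range_drop ng 0
    simp only [Int.natCast_zero, List.drop_zero] at this
    rw [this]
    cases hfe : pvFirstNonEmpty ng with
    | nil => simp
    | cons x xs => simp
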